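-- pv_equiv track=rewrite | github.com/jeffreyleblanc/python3-jlutil | jutil/proc.py | command_pretty_format
-- ===== SOURCE A (Python) =====
-- def command_pretty_format(cmd_list, flag_start="-"):
--     """
--     Takes a command as a shlex list and formats in on multiple lines with \
--     """
--     s = ""
--     last_was_flag = False
--     curr_is_flag = False
--     LST = []
--
--     # Form line pairs
--     for e in cmd_list:
--         e = str(e)
--         curr_is_flag = e.startswith(flag_start)
--
--         if curr_is_flag:
--             LST.append([e])
--         else:
--             if last_was_flag:
--                 LST[-1].append(e)
--             else:
--                 LST.append([e])
--
--         last_was_flag = curr_is_flag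
--
--     # Assemble the string
--     for i,parts in enumerate(LST):
--         s += ( " "*4 if i!=0 else "" ) + " ".join(parts)
--         if i != len(LST)-1:
--             s += " \\\n"
--
--     return s
-- ===== SOURCE B (Python) =====
-- def command_pretty_format(cmd_list, flag_start="-"):
--     """Stateless pairwise formulation: precompute which tokens are flags, then
--     decide each gap's separator from the adjacent pair of tokens alone."""
--     toks = [str(e) for e in cmd_list]
--     flags = [t.startswith(flag_start) for t in toks]
--     pieces = toks[:1]
--     for prev_f, cur_f, t in zip(flags, flags[1:], toks[1:]):
--         pieces.append((" " if prev_f and not cur_f else " \\\n    ") + t)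
--     return "".join(pieces)
-- ===== Notes on version B (the rewrite author's own statement) =====
-- stated objective: alternative
-- what changed: Replaces A's stateful two-pass grouping (build a list of token-lists tracking last_was_flag, then an index-based assembly loop) with a stateless pairwise formulation: precompute the is-flag boolean for every token once, then each gap's separator (' ' vs ' \\\n ') is decided locally from the adjacent pair of flags via a zip, and the pieces are concatenated by one join.
import Mathlib
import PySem

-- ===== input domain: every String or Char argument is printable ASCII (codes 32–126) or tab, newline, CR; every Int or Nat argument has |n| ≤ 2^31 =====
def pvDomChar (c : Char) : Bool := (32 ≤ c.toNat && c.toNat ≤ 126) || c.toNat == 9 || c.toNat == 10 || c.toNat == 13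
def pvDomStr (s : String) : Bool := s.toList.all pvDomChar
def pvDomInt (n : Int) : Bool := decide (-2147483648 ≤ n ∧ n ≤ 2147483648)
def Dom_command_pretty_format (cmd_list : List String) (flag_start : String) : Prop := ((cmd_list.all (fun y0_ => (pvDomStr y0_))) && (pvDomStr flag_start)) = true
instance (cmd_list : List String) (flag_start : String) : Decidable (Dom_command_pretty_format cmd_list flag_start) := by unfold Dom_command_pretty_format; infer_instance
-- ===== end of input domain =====

-- B replaces A's stateful two-pass grouping by a stateless pairwise formulation (precomputed
-- flag list, per-gap separator from adjacent flags via zip, one join); objective: alternative.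

-- ===== PORT A =====
-- one step of A's first loop: extend LST (the list of token groups) and set last_was_flag
def cpfStepA (flag_start : String) (st : List (List String) × Bool) (e : String) : List (List String) × Bool :=
  let curr_is_flag := PySem.Str.startswith e flag_start
  let LST' :=
    if curr_is_flag then st.1 ++ [[e]]
    else if st.2 then st.1.dropLast ++ [st.1.getLastD [] ++ [e]]
    else st.1 ++ [[e]]
  (LST', curr_is_flag)

-- one step of A's second loop (n = len(LST)): s += ("    " if i!=0 else "") + " ".join(parts); if i != n-1: s += " \\\n"
def cpfAsmStep (n : Int) (s : String) (ip : Int × List String) : String :=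
  if ip.1 ≠ n - 1 then
    (s ++ (if ip.1 ≠ 0 then "    " else "") ++ PySem.Str.join " " ip.2) ++ " \\\n"
  else
    s ++ (if ip.1 ≠ 0 then "    " else "") ++ PySem.Str.join " " ip.2

def command_pretty_format (cmd_list : List String) (flag_start : String) : String :=
  let LST := (cmd_list.foldl (cpfStepA flag_start) ([], false)).1
  (PySem.List.enumerate LST 0).foldl (cpfAsmStep (LST.length : Int)) ""

-- ===== PORT B =====
-- B: flags[i] precomputed for all tokens; the loop over zip(flags, flags[1:], toks[1:])
-- appends separator+token pieces; "".join at the end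
def command_pretty_format_alt (cmd_list : List String) (flag_start : String) : String :=
  let flags := cmd_list.map (fun t => PySem.Str.startswith t flag_start)
  let pieces := (flags.zip (flags.tail.zip cmd_list.tail)).foldl
      (fun acc x => acc ++ [(if x.1 && !x.2.1 then " " else " \\\n    ") ++ x.2.2])
      (cmd_list.take 1)
  PySem.Str.join "" pieces

-- ===== PRECONDITION & SPEC =====
def Spec_command_pretty_format (cmd_list : List String) (flag_start : String) (out : String) : Prop := out = command_pretty_format_alt cmd_list flag_start
instance (cmd_list : List String) (flag_start : String) (out : String) : Decidable (Spec_command_pretty_format cmd_list flag_start out) := by unfold Spec_command_pretty_format; infer_instance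

-- ===== CLAIM (what is proved, stated in full; the proofs are below) =====
def Claim_equal_command_pretty_format : Prop := ∀ (cmd_list : List String) (flag_start : String), Dom_command_pretty_format cmd_list flag_start → Spec_command_pretty_format cmd_list flag_start (command_pretty_format cmd_list flag_start)

-- ===== LEMMAS AND PROOFS =====

-- String-level facts about PySem.Str.join
theorem strJoin_nil (sep : String) : PySem.Str.join sep ([] : List String) = "" := by
  rw [← String.toList_inj]; simp [PySem.Str.toList_join, PySem.Chars.join_nil]

theorem strJoin_singleton (sep p : String) : PySem.Str.join sep [p] = p := by
  rw [← String.toList_inj]; simp [PySem.Str.toList_join, PySem.Chars.join_singleton]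

theorem strJoin_cons_cons (sep p q : String) (r : List String) :
    PySem.Str.join sep (p :: q :: r) = p ++ sep ++ PySem.Str.join sep (q :: r) := by
  rw [← String.toList_inj]; simp [PySem.Str.toList_join, PySem.Chars.join_cons_cons]

theorem strJoinE_cons (p : String) (r : List String) :
    PySem.Str.join "" (p :: r) = p ++ PySem.Str.join "" r := by
  cases r with
  | nil => simp [strJoin_singleton, strJoin_nil]
  | cons q r' => rw [strJoin_cons_cons]; simp

-- join over an arbitrary separator, last element extended on the right
theorem strJoin_snoc (sep x : String) (xs : List String) (y : String) :
    PySem.Str.join sep ((x :: xs) ++ [y]) = PySem.Str.join sep (x :: xs) ++ sep ++ y := by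
  induction xs generalizing x with
  | nil => simp only [List.cons_append, List.nil_append, strJoin_cons_cons, strJoin_singleton]
  | cons q r ih =>
      have h := ih q
      simp only [List.cons_append] at h ⊢
      rw [strJoin_cons_cons, strJoin_cons_cons sep x q r, h]
      simp [String.append_assoc]

-- join with the LAST line extended in place (A-side "glue onto previous line" step)
theorem strJoin_mod_last (sep : String) (ls : List String) (h : ls ≠ []) (s : String) :
    PySem.Str.join sep (ls.dropLast ++ [ls.getLastD "" ++ s])
      = PySem.Str.join sep ls ++ s := by
  induction ls with
  | nil => simp at h
  | cons a l ih =>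
      cases l with
      | nil => simp [strJoin_singleton]
      | cons b l' =>
          have hd : (a :: b :: l').dropLast = a :: (b :: l').dropLast := by simp
          have hg : (a :: b :: l').getLastD "" = (b :: l').getLastD "" := by
            simp
          rw [hd, hg]
          have htail := ih (by simp)
          have hne : (b :: l').dropLast ++ [(b :: l').getLastD "" ++ s] ≠ [] := by simp
          obtain ⟨c, r, hcr⟩ := List.exists_cons_of_ne_nil hne
          rw [List.cons_append, hcr, strJoin_cons_cons, ← hcr, htail,
              strJoin_cons_cons]
          simp [String.append_assoc]

-- " ".join of one group, as a string
def cpfG (parts : List String) : String := PySem.Str.join " " parts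

theorem cpfG_singleton (e : String) : cpfG [e] = e := strJoin_singleton " " e

theorem cpfG_getLastD (LST : List (List String)) (h : LST ≠ []) :
    (LST.map cpfG).getLastD "" = cpfG (LST.getLastD []) := by
  induction LST with
  | nil => simp at h
  | cons p r ih =>
      cases r with
      | nil => simp
      | cons q r' => simpa using ih (by simp)

-- the intermediate reference: A's group fold collapsed to line strings
def cpfStepL (flag_start : String) (st : List String × Bool) (e : String) : List String × Bool :=
  let is_flag := PySem.Str.startswith e flag_start
  if is_flag || !st.2 then (st.1 ++ [e], is_flag)
  else (st.1.dropLast ++ [st.1.getLastD "" ++ " " ++ e], is_flag)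

-- A's group fold, mapped through " ".join, is the line-string fold
theorem cpf_build_corr (flag_start : String) (cmd : List String) :
    ∀ (LST : List (List String)) (lwf : Bool),
      (∀ p ∈ LST, p ≠ []) → (lwf = true → LST ≠ []) →
      cmd.foldl (cpfStepL flag_start) (LST.map cpfG, lwf)
        = ((cmd.foldl (cpfStepA flag_start) (LST, lwf)).1.map cpfG,
           (cmd.foldl (cpfStepA flag_start) (LST, lwf)).2) := by
  induction cmd with
  | nil => intro LST lwf _ _; simp
  | cons e cmd ih =>
      intro LST lwf hne hlwf
      simp only [List.foldl_cons]
      cases hf : PySem.Chars.startswith e.toList flag_start.toList with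
      | true =>
          have hA : cpfStepA flag_start (LST, lwf) e = (LST ++ [[e]], true) := by
            simp [cpfStepA, hf]
          have hB : cpfStepL flag_start (LST.map cpfG, lwf) e = ((LST ++ [[e]]).map cpfG, true) := by
            simp [cpfStepL, hf, cpfG_singleton]
          rw [hA, hB]
          have h1 : ∀ p ∈ LST ++ [[e]], p ≠ [] := by
            intro p hp
            rcases List.mem_append.1 hp with h | h
            · exact hne p h
            · simp at h; simp [h]
          exact ih _ _ h1 (by simp)
      | false =>
          cases hl : lwf with
          | false =>
              have hA : cpfStepA flag_start (LST, false) e = (LST ++ [[e]], false) := by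
                simp [cpfStepA, hf]
              have hB : cpfStepL flag_start (LST.map cpfG, false) e
                  = ((LST ++ [[e]]).map cpfG, false) := by
                simp [cpfStepL, hf, cpfG_singleton]
              rw [hA, hB]
              have h1 : ∀ p ∈ LST ++ [[e]], p ≠ [] := by
                intro p hp
                rcases List.mem_append.1 hp with h | h
                · exact hne p h
                · simp at h; simp [h]
              exact ih _ _ h1 (by simp)
          | true =>
              have hLne : LST ≠ [] := hlwf hl
              have hA : cpfStepA flag_start (LST, true) e
                  = (LST.dropLast ++ [LST.getLastD [] ++ [e]], false) := by
                simp [cpfStepA, hf]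
              have hB : cpfStepL flag_start (LST.map cpfG, true) e
                  = ((LST.map cpfG).dropLast ++ [(LST.map cpfG).getLastD "" ++ " " ++ e], false) := by
                simp [cpfStepL, hf]
              rw [hA, hB]
              obtain ⟨x, xs, hlast⟩ : ∃ x xs, LST.getLastD [] = x :: xs := by
                have hmem : LST.getLastD [] ∈ LST := by
                  cases LST with
                  | nil => exact absurd rfl hLne
                  | cons a l =>
                      rw [List.getLastD_cons]
                      exact List.getLastD_mem_cons (l := l) (a := a)
                have := hne _ hmem
                cases h : LST.getLastD [] with
                | nil => exact absurd h this
                | cons x xs => exact ⟨x, xs, rfl⟩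
              have hsnoc : cpfG (LST.getLastD [] ++ [e]) = cpfG (LST.getLastD []) ++ " " ++ e := by
                rw [hlast]; exact strJoin_snoc " " x xs e
              have hline : (LST.map cpfG).dropLast ++ [(LST.map cpfG).getLastD "" ++ " " ++ e]
                  = (LST.dropLast ++ [LST.getLastD [] ++ [e]]).map cpfG := by
                rw [cpfG_getLastD LST hLne, ← hsnoc]
                simp [← List.map_dropLast]
              rw [hline]
              have h1 : ∀ p ∈ LST.dropLast ++ [LST.getLastD [] ++ [e]], p ≠ [] := by
                intro p hp
                rcases List.mem_append.1 hp with h | h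
                · exact hne p (List.dropLast_subset _ h)
                · simp at h; simp [h]
              exact ih _ _ h1 (by simp)

-- the tail of A's assembly (lines after the first), already as line strings
def cpfRest (ls : List String) : String :=
  match ls with
  | [] => ""
  | p :: r => "    " ++ p ++ (match r with | [] => "" | _ => " \\\n") ++ cpfRest r

theorem cpfLit (X : String) : " \\\n" ++ ("    " ++ X) = " \\\n    " ++ X := by
  rw [← String.append_assoc]
  congr 1

theorem cpfRest_join (xs : List String) : ∀ p x : String,
    (p ++ " \\\n") ++ cpfRest (x :: xs) = PySem.Str.join " \\\n    " (p :: x :: xs) := by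
  induction xs with
  | nil =>
      intro p x
      rw [strJoin_cons_cons, strJoin_singleton]
      simp only [cpfRest, String.append_empty]
      simp [String.append_assoc, cpfLit]
  | cons y ys ih =>
      intro p x
      rw [strJoin_cons_cons, ← ih x y]
      simp only [cpfRest]
      simp [String.append_assoc, cpfLit]

theorem cpf_asm_tail (n : Int) (sub : List (List String)) :
    ∀ (k : Nat) (acc : String), 1 ≤ k → (k : Int) + sub.length = n →
    (PySem.List.enumerate sub (k : Int)).foldl (cpfAsmStep n) acc
      = acc ++ cpfRest (sub.map cpfG) := by
  induction sub with
  | nil =>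
      intro k acc _ _
      simp [PySem.List.enumerate_nil, cpfRest, String.append_empty]
  | cons p sub ih =>
      intro k acc hk hn
      push_cast [List.length_cons] at hn
      have hk0 : (k : Int) ≠ 0 := by omega
      rw [PySem.List.enumerate_cons]
      simp only [List.foldl_cons]
      cases sub with
      | nil =>
          have hkn : ¬ ((k : Int) ≠ n - 1) := by simp at hn ⊢; omega
          rw [PySem.List.enumerate_nil]
          simp only [List.foldl_nil, cpfAsmStep, if_neg hkn, if_pos hk0]
          simp [cpfRest, cpfG, String.append_assoc, String.append_empty]
      | cons q r =>
          have hkn : (k : Int) ≠ n - 1 := by simp at hn; omega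
          have hstep : cpfAsmStep n acc ((k : Int), p)
              = acc ++ ("    " ++ cpfG p ++ " \\\n") := by
            simp only [cpfAsmStep, if_pos hkn, if_pos hk0, cpfG]
            rw [String.append_assoc, String.append_assoc, String.append_assoc]
          rw [hstep]
          have hcast : (k : Int) + 1 = ((k + 1 : Nat) : Int) := by push_cast; ring
          rw [hcast, ih (k + 1) _ (by omega) (by push_cast; simp at hn ⊢; omega)]
          simp [cpfRest, String.append_assoc]

-- A's whole assembly loop is one join with separator " \\\n    "
theorem cpf_asm (LST : List (List String)) :
    (PySem.List.enumerate LST 0).foldl (cpfAsmStep (LST.length : Int)) ""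
      = PySem.Str.join " \\\n    " (LST.map cpfG) := by
  cases LST with
  | nil => simp [PySem.List.enumerate_nil, strJoin_nil]
  | cons p r =>
      rw [PySem.List.enumerate_cons]
      simp only [List.foldl_cons]
      cases r with
      | nil =>
          have h0 : ¬ ((0 : Int) ≠ (([p] : List (List String)).length : Int) - 1) := by
            simp
          rw [PySem.List.enumerate_nil]
          simp only [List.foldl_nil, cpfAsmStep, if_neg h0]
          simp only [if_neg (show ¬ ((0 : Int) ≠ 0) from by simp)]
          rw [String.empty_append, String.empty_append]
          simp [cpfG, strJoin_singleton]
      | cons q r' =>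
          have hne : (0 : Int) ≠ ((p :: q :: r').length : Int) - 1 := by
            simp [List.length_cons]; omega
          have hstep : cpfAsmStep (((p :: q :: r').length : Int)) "" ((0 : Int), p)
              = cpfG p ++ " \\\n" := by
            simp only [cpfAsmStep, if_pos hne, if_neg (show ¬ ((0 : Int) ≠ 0) from by simp)]
            rw [String.empty_append, String.empty_append]
            rfl
          rw [hstep]
          have h1 : ((0 : Int) + 1) = ((1 : Nat) : Int) := by norm_num
          rw [h1, cpf_asm_tail _ _ 1 _ (le_refl 1) (by push_cast [List.length_cons]; omega)]
          simp only [List.map_cons]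
          exact cpfRest_join _ (cpfG p) (cpfG q)

-- the common reference: for each remaining token its separator from (previous flag, its flag)
def cpfRefT (flag_start : String) (pf : Bool) : List String → String
  | [] => ""
  | t :: r =>
      (if pf && !(PySem.Str.startswith t flag_start) then " " else " \\\n    ")
        ++ t ++ cpfRefT flag_start (PySem.Str.startswith t flag_start) r

-- A's line-string fold, joined, equals the reference
theorem cpf_lines_ref (flag_start : String) (cmd : List String) :
    ∀ (ls : List String) (lwf : Bool), ls ≠ [] →
      PySem.Str.join " \\\n    " (cmd.foldl (cpfStepL flag_start) (ls, lwf)).1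
        = PySem.Str.join " \\\n    " ls ++ cpfRefT flag_start lwf cmd := by
  induction cmd with
  | nil => intro ls lwf _; simp [cpfRefT, String.append_empty]
  | cons e cmd ih =>
      intro ls lwf hls
      obtain ⟨x, xs, rfl⟩ := List.exists_cons_of_ne_nil hls
      simp only [List.foldl_cons]
      by_cases hc : (PySem.Str.startswith e flag_start || !lwf) = true
      · have hstep : cpfStepL flag_start (x :: xs, lwf) e = ((x :: xs) ++ [e], PySem.Str.startswith e flag_start) := by
          simp only [cpfStepL]; rw [if_pos hc]
        rw [hstep, ih _ _ (by simp), strJoin_snoc]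
        have hsep : (if lwf && !(PySem.Str.startswith e flag_start) then " " else " \\\n    ") = " \\\n    " := by
          rcases Bool.or_eq_true_iff.1 hc with h | h
          · have h' : PySem.Chars.startswith e.toList flag_start.toList = true := h
            simp [h']
          · have hlf : lwf = false := by cases lwf <;> simp_all
            simp [hlf]
        simp only [cpfRefT]
        rw [hsep]
        simp [String.append_assoc]
      · have hlwf : lwf = true := by
          cases lwf <;> simp_all
        have hf : PySem.Str.startswith e flag_start = false := by
          cases h : PySem.Str.startswith e flag_start <;> simp_all
        have hstep : cpfStepL flag_start (x :: xs, lwf) e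
            = ((x :: xs).dropLast ++ [(x :: xs).getLastD "" ++ " " ++ e], false) := by
          simp only [cpfStepL]; rw [if_neg hc, hf]
        rw [hstep]
        have hne2 : (x :: xs).dropLast ++ [(x :: xs).getLastD "" ++ " " ++ e] ≠ [] := by simp
        rw [ih _ _ hne2]
        have hmod : PySem.Str.join " \\\n    " ((x :: xs).dropLast ++ [(x :: xs).getLastD "" ++ " " ++ e])
            = PySem.Str.join " \\\n    " (x :: xs) ++ (" " ++ e) := by
          have := strJoin_mod_last " \\\n    " (x :: xs) (by simp) (" " ++ e)
          rw [← this]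
          congr 2
          rw [String.append_assoc]
        rw [hmod]
        simp only [cpfRefT]
        rw [hlwf, hf]
        simp [String.append_assoc]

-- foldl that only appends singletons is map
theorem foldl_push {α β : Type} (g : α → β) (l : List α) :
    ∀ init : List β, l.foldl (fun acc x => acc ++ [g x]) init = init ++ l.map g := by
  induction l with
  | nil => intro init; simp
  | cons a l ih => intro init; simp [ih]

-- B's zipped tail, joined, equals the reference
theorem cpf_alt_tail (flag_start : String) (rest : List String) :
    ∀ pf : Bool,
      PySem.Str.join ""
        (((pf :: rest.map (fun t => PySem.Str.startswith t flag_start)).zip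
            ((rest.map (fun t => PySem.Str.startswith t flag_start)).zip rest)).map
          (fun x => (if x.1 && !x.2.1 then " " else " \\\n    ") ++ x.2.2))
        = cpfRefT flag_start pf rest := by
  induction rest with
  | nil => intro pf; simp [cpfRefT, strJoin_nil]
  | cons t r ih =>
      intro pf
      simp only [List.map_cons, List.zip_cons_cons, List.map]
      rw [strJoinE_cons, ih (PySem.Str.startswith t flag_start)]
      simp [cpfRefT, String.append_assoc]

-- ===== VERDICT (by name: the statement is the Claim_ definition above) =====
theorem command_pretty_format_spec : Claim_equal_command_pretty_format := by
  intro cmd_list flag_start _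
  unfold Spec_command_pretty_format
  cases cmd_list with
  | nil =>
      simp [command_pretty_format, command_pretty_format_alt,
        PySem.List.enumerate_nil, strJoin_nil]
  | cons t rest =>
      simp only [command_pretty_format, command_pretty_format_alt]
      -- A side: groups → line strings → join " \\\n    " → reference
      have hb := cpf_build_corr flag_start (t :: rest) [] false (by simp) (by simp)
      simp only [List.map_nil] at hb
      rw [cpf_asm]
      have h1 : ((t :: rest).foldl (cpfStepA flag_start) ([], false)).1.map cpfG
          = ((t :: rest).foldl (cpfStepL flag_start) ([], false)).1 := by rw [hb]
      rw [h1]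
      have hfirst : cpfStepL flag_start ([], false) t = ([t], PySem.Str.startswith t flag_start) := by
        simp [cpfStepL]
      simp only [List.foldl_cons, hfirst]
      rw [cpf_lines_ref flag_start rest [t] _ (by simp), strJoin_singleton]
      -- B side
      simp only [List.map_cons, List.tail_cons, foldl_push,
        show (t :: rest).take 1 = [t] from by simp]
      rw [List.singleton_append, strJoinE_cons,
        cpf_alt_tail flag_start rest (PySem.Str.startswith t flag_start)]
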